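-- pv_equiv track=rewrite | github.com/youngkwangjoo/codingTest | 프로그래머스/0/181932. 코드 처리하기/코드 처리하기.py | solution
-- ===== SOURCE A (Python) =====
-- def solution(code):
--     code = list(code)
--     mode = 0
--     ret = []
--
--     for i in range(len(code)):
--         if code[i] == "1":
--             mode = 1 - mode
--         else:
--             if mode == 0 and i % 2 == 0:
--                 ret.append(code[i])
--             elif mode == 1 and i % 2 == 1:
--                 ret.append(code[i])
--
--     answer = ''.join(ret)
--     if answer == "":
--         answer = "EMPTY"
--     return answer
-- ===== SOURCE B (Python) =====
-- def solution(code):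
--     # Split on '1': the mode inside the j-th segment is simply j % 2 (each '1'
--     # toggles it once), so each segment contributes a stride-2 slice starting at
--     # the offset whose absolute index parity equals that mode.
--     parts = code.split("1")
--     pieces = []
--     start = 0
--     for j, seg in enumerate(parts):
--         off = (j % 2 - start) % 2
--         pieces.append(seg[off::2])
--         start += len(seg) + 1
--     answer = "".join(pieces)
--     return answer if answer else "EMPTY"
-- ===== Notes on version B (the rewrite author's own statement) =====
-- stated objective: faster
-- what changed: Replaces A's per-character mode-toggle state machine by splitting the string on the toggle character (mode inside the j-th segment is j % 2) and taking one stride-2 slice per segment at the offset matching that parity, then joining the pieces.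
import Mathlib
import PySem

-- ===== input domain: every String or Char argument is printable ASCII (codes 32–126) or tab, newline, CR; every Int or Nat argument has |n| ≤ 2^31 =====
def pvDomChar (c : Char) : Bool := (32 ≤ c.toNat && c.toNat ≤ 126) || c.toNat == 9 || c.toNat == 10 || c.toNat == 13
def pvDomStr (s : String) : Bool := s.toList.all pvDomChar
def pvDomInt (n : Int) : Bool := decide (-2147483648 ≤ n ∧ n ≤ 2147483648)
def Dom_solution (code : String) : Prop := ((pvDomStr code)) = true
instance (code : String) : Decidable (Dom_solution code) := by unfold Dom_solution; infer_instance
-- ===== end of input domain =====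

-- B replaces A's per-character mode-toggle state machine by split-on-'1' plus one stride-2
-- slice per segment, joined at the end (measured faster in Python: bulk split/slice instead of a
-- per-character loop); return values agree on all inputs.

-- ===== PORT A =====
def solution (code : String) : String :=
  let codeL := code.toList
  let st := (PySem.List.enumerate codeL 0).foldl
    (fun (st : Int × List Char) (p : Int × Char) =>
      if p.2 = '1' then (1 - st.1, st.2)
      else if st.1 = 0 ∧ PySem.Int.mod p.1 2 = 0 then (st.1, st.2 ++ [p.2])
      else if st.1 = 1 ∧ PySem.Int.mod p.1 2 = 1 then (st.1, st.2 ++ [p.2])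
      else (st.1, st.2)) ((0 : Int), ([] : List Char))
  let answer := String.ofList st.2
  if answer = "" then "EMPTY" else answer

-- ===== PORT B =====
-- seg[off::2] is PySem.List.slice? … 2; the step is 2 ≠ 0, so the slice never fails and .getD [] is exact
def solution_alt (code : String) : String :=
  let parts := PySem.Chars.splitOn code.toList ['1']
  let st := (PySem.List.enumerate parts 0).foldl
    (fun (st : List (List Char) × Int) (p : Int × List Char) =>
      (st.1 ++ [(PySem.List.slice? p.2 (some (PySem.Int.mod (PySem.Int.mod p.1 2 - st.2) 2)) none 2).getD []],
       st.2 + PySem.Chars.len p.2 + 1)) (([] : List (List Char)), (0 : Int))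
  let answer := String.ofList (PySem.Chars.join [] st.1)
  if answer = "" then "EMPTY" else answer

-- ===== PRECONDITION & SPEC =====
def Spec_solution (code : String) (out : String) : Prop := out = solution_alt code
instance (code : String) (out : String) : Decidable (Spec_solution code out) := by unfold Spec_solution; infer_instance

-- ===== CLAIM (what is proved, stated in full; the proofs are below) =====
def Claim_equal_solution : Prop := ∀ (code : String), Dom_solution code → Spec_solution code (solution code)

-- ===== LEMMAS AND PROOFS =====

def strideTwo {α : Type} : List α → List α
  | [] => []
  | [a] => [a]
  | a :: _ :: t => a :: strideTwo t

lemma filterMap_range_stride {α : Type} (ys : List α) :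
    (List.range ((ys.length + 1) / 2)).filterMap (fun k => ys[2 * k]?) = strideTwo ys := by
  induction ys using strideTwo.induct with
  | case1 => simp [strideTwo]
  | case2 a => simp [strideTwo, List.range_succ]
  | case3 a b t ih =>
    have hlen : ((a :: b :: t).length + 1) / 2 = (t.length + 1) / 2 + 1 := by
      simp only [List.length_cons]; omega
    rw [hlen, List.range_succ_eq_map, List.filterMap_cons, List.filterMap_map]
    have : (fun k => (a :: b :: t)[2 * k]?) ∘ (fun n => n + 1) = (fun k => t[2 * k]?) := by
      funext k
      simp only [Function.comp_apply]
      have h2 : 2 * (k + 1) = 2 * k + 1 + 1 := by omega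
      rw [h2]
      simp
    rw [this, ih]
    simp [strideTwo]

lemma sliceIdx2 {α : Type} (xs : List α) (off : Nat) :
    PySem.List.sliceIndices xs.length (some (off : Int)) none 2
      = (((min off xs.length : Nat) : Int), (xs.length : Int), 2) := by
  unfold PySem.List.sliceIndices
  norm_num

lemma slice?_stride2 {α : Type} (xs : List α) (off : Nat) :
    PySem.List.slice? xs (some (off : Int)) none 2 = some (strideTwo (xs.drop off)) := by
  unfold PySem.List.slice?
  rw [sliceIdx2]
  norm_num
  set s : Nat := min off xs.length with hs
  have hdrop : xs.drop s = xs.drop off := by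
    by_cases h : off ≤ xs.length
    · rw [show s = off by omega]
    · rw [show s = xs.length by omega, List.drop_length, List.drop_eq_nil_of_le (by omega)]
  have hmin : min ((off:Int)) ((xs.length:Int)) = ((s:Nat) : Int) := by omega
  rw [hmin]
  have hcount : (if off < xs.length then (((xs.length:Int) - ((s:Nat):Int) + 2 - 1) / 2).toNat else 0)
      = ((xs.drop s).length + 1) / 2 := by
    simp only [List.length_drop]
    split_ifs with h <;> omega
  rw [hcount]
  calc (List.range (((xs.drop s).length + 1) / 2)).filterMap (fun (k : Nat) => xs[((s:Int) + 2 * (k:Int)).toNat]?)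
      = (List.range (((xs.drop s).length + 1) / 2)).filterMap (fun k => (xs.drop s)[2 * k]?) := by
        refine List.filterMap_congr (fun k _ => ?_)
        rw [show ((s:Int) + 2 * (k:Int)).toNat = s + 2 * k from by omega, ← List.getElem?_drop]
    _ = strideTwo (xs.drop s) := filterMap_range_stride _
    _ = strideTwo (xs.drop off) := by rw [hdrop]

-- common specification: kept characters at absolute index k, having seen cnt '1's so far
def specAux : Int → Int → List Char → List Char
  | _, _, [] => []
  | k, cnt, c :: cs =>
    if c = '1' then specAux (k+1) (cnt+1) cs
    else if PySem.Int.mod cnt 2 = PySem.Int.mod k 2 then c :: specAux (k+1) cnt cs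
    else specAux (k+1) cnt cs

lemma mod2_eq (n : Int) : PySem.Int.mod n 2 = n % 2 :=
  PySem.Int.mod_eq_emod_of_pos (by omega)

lemma strideTwo_cons {α : Type} (c : α) (xs : List α) :
    strideTwo (c :: xs) = c :: strideTwo (xs.drop 1) := by
  cases xs <;> simp [strideTwo]

lemma segLemma (p : List Char) (hp : '1' ∉ p) : ∀ (k cnt : Int) (tail : List Char),
    specAux k cnt (p ++ tail)
    = strideTwo (p.drop ((cnt - k) % 2).toNat) ++ specAux (k + p.length) cnt tail := by
  induction p with
  | nil => intro k cnt tail; simp [strideTwo]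
  | cons c p ih =>
    intro k cnt tail
    have hc : c ≠ '1' := fun h => hp (h ▸ List.mem_cons_self)
    have hp' : '1' ∉ p := fun h => hp (List.mem_cons_of_mem _ h)
    rw [List.cons_append]
    have harith : k + ((List.length (c :: p) : Nat) : Int) = k + 1 + (p.length : Int) := by
      simp only [List.length_cons]; push_cast; ring
    by_cases heq : PySem.Int.mod cnt 2 = PySem.Int.mod k 2
    · have h0 : ((cnt - k) % 2).toNat = 0 := by
        simp only [mod2_eq] at heq; omega
      have h1 : ((cnt - (k+1)) % 2).toNat = 1 := by
        simp only [mod2_eq] at heq; omega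
      simp only [specAux, if_neg hc, if_pos heq, ih hp' (k+1) cnt tail, h1, h0,
        List.drop_zero, strideTwo_cons, List.cons_append, harith]
    · have h1 : ((cnt - k) % 2).toNat = 1 := by
        simp only [mod2_eq] at heq; omega
      have h0 : ((cnt - (k+1)) % 2).toNat = 0 := by
        simp only [mod2_eq] at heq; omega
      simp only [specAux, if_neg hc, if_neg heq, ih hp' (k+1) cnt tail, h0, h1,
        List.drop_succ_cons, List.drop_zero, harith]

def splitSpec : List Char → List (List Char)
  | [] => [[]]
  | c :: t => if c = '1' then [] :: splitSpec t else (splitSpec t).modifyHead (c :: ·)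

lemma splitSpec_cons (cs : List Char) : ∃ h t, splitSpec cs = h :: t := by
  induction cs with
  | nil => exact ⟨[], [], rfl⟩
  | cons c t ih =>
    rcases ih with ⟨h, t', ht⟩
    by_cases hc : c = '1'
    · exact ⟨[], splitSpec t, by simp [splitSpec, hc]⟩
    · exact ⟨c :: h, t', by simp [splitSpec, hc, ht]⟩

lemma splitOn_go_eq : ∀ (fuel : Nat) (l cur : List Char) (acc : List (List Char)),
    l.length ≤ fuel →
    PySem.Chars.splitOn.go ['1'] fuel l cur acc
    = acc.reverse ++ (splitSpec l).modifyHead (cur.reverse ++ ·) := by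
  intro fuel
  induction fuel with
  | zero =>
    intro l cur acc hl
    have : l = [] := by cases l <;> simp_all
    subst this
    simp [PySem.Chars.splitOn.go, splitSpec]
  | succ fuel ih =>
    intro l cur acc hl
    cases l with
    | nil => simp [PySem.Chars.splitOn.go, splitSpec]
    | cons c rest =>
      by_cases hc : c = '1'
      · subst hc
        have hpre : List.isPrefixOf ['1'] ('1' :: rest) = true := by simp [List.isPrefixOf]
        rw [PySem.Chars.splitOn.go]
        simp only [hpre, if_pos]
        rw [ih _ _ _ (by simpa using Nat.le_of_succ_le_succ hl)]
        rcases splitSpec_cons rest with ⟨h, t, ht⟩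
        simp [splitSpec, ht]
      · have hpre : List.isPrefixOf ['1'] (c :: rest) = false := by
          simp [List.isPrefixOf]; exact fun h => hc h.symm
        rw [PySem.Chars.splitOn.go]
        simp only [hpre, Bool.false_eq_true, if_false]
        rw [ih _ _ _ (by simpa using Nat.le_of_succ_le_succ hl)]
        rcases splitSpec_cons rest with ⟨h, t, ht⟩
        simp [splitSpec, hc, ht]

lemma splitOn_eq (cs : List Char) : PySem.Chars.splitOn cs ['1'] = splitSpec cs := by
  unfold PySem.Chars.splitOn
  rw [splitOn_go_eq (cs.length + 1) cs [] [] (by omega)]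
  rcases splitSpec_cons cs with ⟨h, t, ht⟩
  simp [ht]

lemma splitSpec_no_one (cs : List Char) : ∀ p ∈ splitSpec cs, '1' ∉ p := by
  induction cs with
  | nil => intro p hp; simp [splitSpec] at hp; simp [hp]
  | cons c t ih =>
    intro p hp
    by_cases hc : c = '1'
    · simp only [splitSpec, if_pos hc, List.mem_cons] at hp
      rcases hp with rfl | hp
      · simp
      · exact ih p hp
    · rcases splitSpec_cons t with ⟨h, t', ht⟩
      simp only [splitSpec, if_neg hc, ht, List.modifyHead, List.mem_cons] at hp
      rcases hp with rfl | hp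
      · intro hm
        rcases List.mem_cons.mp hm with h1 | h1
        · exact hc h1.symm
        · exact ih h (ht ▸ List.mem_cons_self) h1
      · exact ih p (ht ▸ List.mem_cons_of_mem _ hp)

def glue : List (List Char) → List Char
  | [] => []
  | [p] => p
  | p :: q :: ps => p ++ '1' :: glue (q :: ps)

lemma glue_splitSpec (cs : List Char) : glue (splitSpec cs) = cs := by
  induction cs with
  | nil => simp [splitSpec, glue]
  | cons c t ih =>
    rcases splitSpec_cons t with ⟨h, t', ht⟩
    by_cases hc : c = '1'
    · subst hc
      simp only [splitSpec, ht]
      cases t' <;> simp_all [glue]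
    · simp only [splitSpec, if_neg hc, ht, List.modifyHead]
      cases t' <;> simp_all [glue]

lemma join_nil_flatten (ps : List (List Char)) : PySem.Chars.join [] ps = ps.flatten := by
  unfold PySem.Chars.join
  induction ps with
  | nil => rfl
  | cons p ps ih =>
    cases ps with
    | nil => simp [List.intercalate]
    | cons q ps' =>
      rw [show List.intercalate [] (p :: q :: ps') = p ++ List.intercalate [] (q :: ps') from by
        simp [List.intercalate, List.intersperse]]
      simp [ih]

lemma B_fold (parts : List (List Char)) (hparts : ∀ p ∈ parts, '1' ∉ p) :
    ∀ (j k : Int), 0 ≤ j → 0 ≤ k → ∀ (out : List (List Char)),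
    (((PySem.List.enumerate parts j).foldl
      (fun (st : List (List Char) × Int) (p : Int × List Char) =>
        (st.1 ++ [(PySem.List.slice? p.2 (some (PySem.Int.mod (PySem.Int.mod p.1 2 - st.2) 2)) none 2).getD []],
         st.2 + PySem.Chars.len p.2 + 1)) (out, k)).1).flatten
    = out.flatten ++ specAux k j (glue parts) := by
  induction parts with
  | nil => intro j k _ _ out; simp [PySem.List.enumerate_nil, glue, specAux]
  | cons p ps ih =>
    intro j k hj hk out
    have hp : '1' ∉ p := hparts p List.mem_cons_self
    have hps : ∀ q ∈ ps, '1' ∉ q := fun q hq => hparts q (List.mem_cons_of_mem _ hq)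
    have hoff : PySem.Int.mod (PySem.Int.mod j 2 - k) 2 = ((((j - k) % 2).toNat : Nat) : Int) := by
      simp only [mod2_eq]
      omega
    have hslice : (PySem.List.slice? p (some (PySem.Int.mod (PySem.Int.mod j 2 - k) 2)) none 2).getD []
        = strideTwo (p.drop ((j - k) % 2).toNat) := by
      rw [hoff, slice?_stride2]
      rfl
    have hlen : PySem.Chars.len p = (p.length : Int) := PySem.Chars.len_eq p
    rw [PySem.List.enumerate_cons]
    simp only [List.foldl_cons, hslice]
    cases ps with
    | nil =>
      simp only [PySem.List.enumerate_nil, List.foldl_nil]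
      have hseg := segLemma p hp k j []
      rw [List.append_nil] at hseg
      rw [show glue [p] = p from rfl, hseg]
      simp [specAux]
    | cons q ps' =>
      rw [ih hps (j+1) (k + PySem.Chars.len p + 1) (by omega) (by rw [hlen]; positivity)
        (out ++ [strideTwo (p.drop ((j - k) % 2).toNat)])]
      rw [List.flatten_append, List.append_assoc]
      congr 1
      rw [show glue (p :: q :: ps') = p ++ '1' :: glue (q :: ps') from rfl]
      rw [segLemma p hp k j ('1' :: glue (q :: ps'))]
      simp only [List.flatten_cons, List.flatten_nil, List.append_nil]
      congr 1

lemma A_fold (cs : List Char) : ∀ (k cnt : Int) (ret : List Char),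
    ((PySem.List.enumerate cs k).foldl
      (fun (st : Int × List Char) (p : Int × Char) =>
        if p.2 = '1' then (1 - st.1, st.2)
        else if st.1 = 0 ∧ PySem.Int.mod p.1 2 = 0 then (st.1, st.2 ++ [p.2])
        else if st.1 = 1 ∧ PySem.Int.mod p.1 2 = 1 then (st.1, st.2 ++ [p.2])
        else (st.1, st.2)) (PySem.Int.mod cnt 2, ret)).2
    = ret ++ specAux k cnt cs := by
  induction cs with
  | nil => intro k cnt ret; simp [PySem.List.enumerate_nil, specAux]
  | cons c cs ih =>
    intro k cnt ret
    rw [PySem.List.enumerate_cons, List.foldl_cons]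
    by_cases hc : c = '1'
    · rw [if_pos hc]
      have h1 : (1 - PySem.Int.mod cnt 2) = PySem.Int.mod (cnt + 1) 2 := by
        simp only [mod2_eq]; omega
      rw [h1, ih (k+1) (cnt+1) ret]
      simp [specAux, hc]
    · rw [if_neg hc]
      by_cases h1 : PySem.Int.mod cnt 2 = 0 ∧ PySem.Int.mod k 2 = 0
      · rw [if_pos h1, ih (k+1) cnt (ret ++ [c])]
        have heq : cnt % 2 = k % 2 := by
          have := h1; simp only [mod2_eq] at this; omega
        simp [specAux, hc, heq]
      · by_cases h2 : PySem.Int.mod cnt 2 = 1 ∧ PySem.Int.mod k 2 = 1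
        · rw [if_neg h1, if_pos h2, ih (k+1) cnt (ret ++ [c])]
          have heq : cnt % 2 = k % 2 := by
            have := h2; simp only [mod2_eq] at this; omega
          simp [specAux, hc, heq]
        · rw [if_neg h1, if_neg h2, ih (k+1) cnt ret]
          have heq : ¬ cnt % 2 = k % 2 := by
            simp only [mod2_eq] at h1 h2; omega
          simp [specAux, hc, heq]

-- ===== VERDICT (by name: the statement is the Claim_ definition above) =====
theorem solution_spec : Claim_equal_solution := by
  intro code _
  simp only [Spec_solution, solution, solution_alt]
  have hA := A_fold code.toList 0 0 []
  rw [show PySem.Int.mod 0 2 = (0 : Int) from by decide, List.nil_append] at hA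
  rw [hA]
  rw [splitOn_eq code.toList, join_nil_flatten]
  rw [B_fold (splitSpec code.toList) (splitSpec_no_one code.toList) 0 0 le_rfl le_rfl []]
  rw [glue_splitSpec]
  simp
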